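/- GENERATED by mk_final_copies.py from the proof of the farm's unit `imdct_step3_inner_s_loop.2` (farm:imdct_step3_inner_s_loop.2.2: Lemmas.lean) as the
   re-elaboration sweep compiled it — do not edit. -/
/-
  Unit imdct_step3_inner_s_loop.2, part 1 of 2 (part 2: Proof.lean): the vocabulary, the pure lemmas and float pairs 1 and 2.

  The segment (0x106010 … 0x1062b8: the body of the loop of stb_vorbis_fixed.c:2547, four float pairs, `ee0 -= k0 ; ee2 -= k0 ; --i`)
  is walked as four lemmas `pair1_ok … pair4_ok` over an intermediate assertion `AtPair` (the entry assertion `AtBody` at another RIP,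
  with the two pointer equations of `Loop` UNGUARDED: inside the body `s < n'` holds), composed in `body_ok` (Proof.lean). What the
  body establishes at the loop head is `AtHeadIf`: `AtHead … (s + 1)` with the two pointer equations CONDITIONAL on "the lower
  pointer did not wrap below 0". That condition does not follow from the precondition in the last iteration (`pre_allows_wrap`:
  why `Loop.ee0 / ee2` are guarded by `s < n'`), and holds when another iteration follows (`nowrap_of_more`): `atHead_of_headIf`.

  TWO FILES because of the memory: the four walks in one `lean` process peak at 29.6 GB (10 min); two pairs per file halve both.

  MACHINERY NOTES: the walk stops after every check call to `clear w_zmm` (the check's `w_zmm` switches the tracking of the vector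
  registers on, and the term doubles per SSE step); in pair 4 the walker's facts with `signExtend` / `<<<` leave the context
  before the frame tactics run (`u_omega` fails with them there).
-/
import Asan.CheckWalk
import Vorbis.Spec.Units.imdct_step3_inner_s_loop_2
open X86 X86.User Asan Vorbis Vorbis.Spec

set_option maxRecDepth 4000
set_option maxHeartbeats 40000000

namespace Vorbis.Spec.imdct_step3_inner_s_loop_2

/-- Start of C line 2555 (`k00 = ee0[-2] - ee2[-2]`, float pair 2 of the body): 0x1060b6 `lea rdi, [rbp-0x8]`. -/
abbrev pair2 : Word := 0x1060b6

/-- Start of C line 2562 (`k00 = ee0[-4] - ee2[-4]`, float pair 3 of the body): 0x10615d `lea rdi, [rbp-0x10]`. -/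
abbrev pair3 : Word := 0x10615d

/-- Start of C line 2569 (`k00 = ee0[-6] - ee2[-6]`, float pair 4 of the body): 0x106204 `lea rdi, [rbp-0x18]`. -/
abbrev pair4 : Word := 0x106204

/-- **The loop invariant INSIDE the body** (`s < n'`: an iteration is running): the fields of `imdct_step3_inner_s_loop.Loop` with the
two pointer equations WITHOUT their guard `s < n'` (rbp = `ee0 − 4 k0 s`, rbx = `ee2 − 4 k0 s` as sums of natural numbers). A
conjunction in the order of `Loop`'s fields. -/
def LoopIn (u₀ : State) (others : List Obj) (frames : List (Nat × FrameLayout)) (len i0 koff k0 aoff : Nat) (ue : State)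
    (ret : Word) (s : Nat) (v : State) : Prop :=
  InBody6 u₀ (imdct_step3_inner_s_loop.spec others frames len i0 koff k0 aoff) Vorbis.L.imdct_step3_inner_s_loop.entry 104 ue ret v ∧
    s ≤ arg32 ue .rdi ∧ (v.reg .r13).toNat = arg32 ue .rdi - s ∧ (v.reg .r15).toNat = k0 ∧
    (v.reg .rbp).toNat + 4 * (k0 * s) = (ue.reg .rsi).toNat + 4 * i0 ∧
    (v.reg .rbx).toNat + 4 * (k0 * s) + 4 * koff = (ue.reg .rsi).toNat + 4 * i0

/-- **The assertion between two float pairs of the body**: the loop invariant after `s` iterations and `s < n'`, at the address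
`P`. The pointers rbp / rbx, the counters r13d / r15d and the frame do not move inside the body, so this is `AtBody` with another
RIP (`atPair_of_atBody`; the pointer equations stand without their guard, `LoopIn`); r12d, r14d, the xmm registers and the scratch
dwords `[rsp]`, `[rsp + 8]` are dead at these points. -/
def AtPair (P : Word) (u₀ : State) (others : List Obj) (frames : List (Nat × FrameLayout)) (len i0 koff k0 aoff : Nat)
    (ue : State) (ret : Word) (s : Nat) (v : State) : Prop :=
  v.rip = P ∧ LoopIn u₀ others frames len i0 koff k0 aoff ue ret s v ∧ s < arg32 ue .rdi

/-- The two pointers after `t` iterations, as the loop invariant `Loop` states them (sums of natural numbers), UNDER THE CONDITION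
that the lower one, `ee2 − 4 k0 t`, is not below 0. (A `def`, not unfolded by the arithmetic tactics.) -/
def PtrsIf (i0 koff k0 : Nat) (ue : State) (t : Nat) (w : State) : Prop :=
  4 * (k0 * t) + 4 * koff ≤ (ue.reg .rsi).toNat + 4 * i0 →
    (w.reg .rbp).toNat + 4 * (k0 * t) = (ue.reg .rsi).toNat + 4 * i0 ∧
    (w.reg .rbx).toNat + 4 * (k0 * t) + 4 * koff = (ue.reg .rsi).toNat + 4 * i0

/-- **What the body establishes at the loop head** after `t = s + 1` iterations: every field of `AtHead … t` except that the two
pointer equations are conditional (`PtrsIf`). With `4 k0 t + 4 koff ≤ e + 4 i0` this IS `AtHead` (`atHead_of_exit`); after the LAST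
iteration the precondition does not give that bound (`pre_allows_wrap`), the pointers may have wrapped below 0 — and are dead. -/
def AtHeadIf (u₀ : State) (others : List Obj) (frames : List (Nat × FrameLayout)) (len i0 koff k0 aoff : Nat) (ue : State)
    (ret : Word) (t : Nat) (w : State) : Prop :=
  w.rip = Vorbis.L.imdct_step3_inner_s_loop.loop1 ∧
    InBody6 u₀ (imdct_step3_inner_s_loop.spec others frames len i0 koff k0 aoff) Vorbis.L.imdct_step3_inner_s_loop.entry 104 ue ret w ∧
    t ≤ arg32 ue .rdi ∧ (w.reg .r13).toNat = arg32 ue .rdi - t ∧ (w.reg .r15).toNat = k0 ∧ PtrsIf i0 koff k0 ue t w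

/-- `movsxd rax, r15d` of a register that holds a non-negative `int` (upper half 0) is that number. -/
theorem sext_of_lt (r : Word) (h : r.toNat < 2 ^ 31) :
    (Word.ofBV (BitVec.signExtend 64 (Word.part .w32 r))).toNat = r.toNat := by
  rw [sext32_toNat, Vorbis.toNat_part32]
  have e : r.toNat % 2 ^ 32 = r.toNat := Nat.mod_eq_of_lt (by omega)
  rw [e, if_pos h]

/-- `shl rax, 2 ; sub p, rax`: the pointer `p` minus `4 k`, when that is not negative. -/
theorem sub_shl2 (p x : Word) (k : Nat) (hx : x.toNat = k) (hk : 4 * k ≤ p.toNat) :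
    (p - x <<< 2).toNat = p.toNat - 4 * k := by
  have hp := p.toNat_lt
  have e : (x <<< 2).toNat = 4 * k := by
    rw [UInt64.toNat_shiftLeft, hx]
    have e2 : (2 : UInt64).toNat % 64 = 2 := rfl
    rw [e2, Nat.shiftLeft_eq]
    omega
  have hle : x <<< 2 ≤ p := by
    rw [UInt64.le_iff_toNat_le, e]
    exact hk
  rw [UInt64.toNat_sub_of_le _ _ hle, e]

/-- `sub r13d, 1` of a counter `1 ≤ r13d` whose upper half is 0. -/
theorem dec32 (r : Word) (h1 : 1 ≤ r.toNat) (h2 : r.toNat < 2 ^ 32) :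
    (Word.ofBV (Word.part .w32 r - 1#32)).toNat = r.toNat - 1 := by
  rw [Vorbis.toNat_ofBV32, BitVec.toNat_sub, Vorbis.toNat_part32]
  have e : r.toNat % 2 ^ 32 = r.toNat := Nat.mod_eq_of_lt h2
  rw [e]
  simp only [BitVec.toNat_ofNat]
  omega


/-- The arithmetic of the precondition does NOT give that bound: `n' = 1`, `s = 0`, `k0 = 2³⁰`, a buffer of 9 floats at the lowest
data address. (`StrideDown` bounds `k0 · (n' − 1)`, not `k0 · n'`; `k0 < 2³¹` is all that is known of `k0` when `n' = 1`.) -/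
theorem pre_allows_wrap :
    ∃ len i0 koff k0 n s b : Nat, Mdct.StrideDown len i0 koff k0 n ∧ k0 < 2 ^ 31 ∧ n < 2 ^ 31 ∧ 1 ≤ koff ∧ koff ≤ 2 ^ 31 ∧
      s < n ∧ 0x119d40 ≤ b ∧ b + 4 * len ≤ 0xC00000 ∧ ¬ (4 * (k0 * (s + 1)) + 4 * koff ≤ b + 4 * i0) := by
  refine ⟨9, 8, 1, 2 ^ 30, 1, 0, 0x119d40, ⟨by decide, by decide⟩, ?_⟩
  decide

/-- The bound holds whenever one more iteration follows (`s + 1 < n'`): guarding the fields `ee0` / `ee2` of `Loop` by `s < n'`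
makes the segment provable. -/
theorem nowrap_of_more {len i0 koff k0 n s b : Nat} (h : Mdct.StrideDown len i0 koff k0 n) (hs : s + 1 < n) :
    4 * (k0 * (s + 1)) + 4 * koff ≤ b + 4 * i0 := by
  have h1 := h.lo
  have h2 : k0 * (s + 1) ≤ k0 * (n - 1) := Nat.mul_le_mul_left k0 (by omega)
  omega

/-- The segment's entry assertion `AtBody` is `AtPair` at `cut1`: `s < n'` discharges the guard of the two pointer fields. -/
theorem atPair_of_atBody {u₀ : State} {others : List Obj} {frames : List (Nat × FrameLayout)} {len i0 koff k0 aoff : Nat}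
    {ue : State} {ret : Word} {s : Nat} {v : State}
    (hv : imdct_step3_inner_s_loop.AtBody u₀ others frames len i0 koff k0 aoff ue ret s v) :
    AtPair Vorbis.L.imdct_step3_inner_s_loop.cut1 u₀ others frames len i0 koff k0 aoff ue ret s v := by
  obtain ⟨hrip, hloop, hlt⟩ := hv
  exact ⟨hrip, ⟨hloop.body, hloop.le, hloop.cnt, hloop.k0reg, hloop.ee0 hlt, hloop.ee2 hlt⟩, hlt⟩

/-- **`AtHeadIf` after `t + 1` iterations is the exit assertion of the statement, `AtHead`**: the pointer fields of `Loop` are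
guarded by `t + 1 < n'` (another iteration follows), and then `StrideDown.lo` bounds `k0 (t + 1)` (`nowrap_of_more`), which is
the condition of `PtrsIf`. After the last iteration nothing is said about rbp and rbx: they may have wrapped, and are dead. -/
theorem atHead_of_headIf {u₀ : State} {others : List Obj} {frames : List (Nat × FrameLayout)} {len i0 koff k0 aoff : Nat}
    {ue : State} {ret : Word} {t : Nat} {w : State} (h : AtHeadIf u₀ others frames len i0 koff k0 aoff ue ret (t + 1) w) :
    imdct_step3_inner_s_loop.AtHead u₀ others frames len i0 koff k0 aoff ue ret (t + 1) w := by
  obtain ⟨hrip, hbody, hle, hcnt, hk0reg, hptrs⟩ := h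
  have hstride : Mdct.StrideDown len i0 koff k0 (arg32 ue .rdi) := hbody.pre.2.2.2.2.2.2.2.2.1
  refine ⟨hrip, hbody, hle, hcnt, hk0reg, ?_, ?_⟩
  · -- `ee0`, for `t + 1 < n'`
    intro hmore
    exact (hptrs (nowrap_of_more hstride hmore)).1
  · -- `ee2`, for `t + 1 < n'`
    intro hmore
    exact (hptrs (nowrap_of_more hstride hmore)).2


/-- **Float pair 1 of the body** (0x106010 … 0x1060b1, C lines 2548-2553: `ee0[-0]`, `ee0[-1]`, `ee2[-0]`, `ee2[-1]` read with four
`load4` checks, combined with two twiddle factors and stored back): from the assertion at its first instruction to the assertion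
at the first instruction of the next pair. -/
theorem pair1_ok (Lay : Layout) (hLay : Lay.hi = 0x1000000) (μ : Microarch) (hμ : UserX.MicroOK μ) (u₀ : State)
    (hcode : HasCodeNat Lay u₀ Vorbis.L.imdct_step3_inner_s_loop.entry Vorbis.Code.code_imdct_step3_inner_s_loop.nat
      Vorbis.L.imdct_step3_inner_s_loop.size)
    (hload4 : Asan.SmallCheck Lay μ Vorbis.WayInv (Vorbis.CodeOK u₀) [.rax, .rcx, .rdx] 4 Vorbis.L.__asan_load4_noabort.entry)
    (others : List Obj) (frames : List (Nat × FrameLayout)) (len i0 koff k0 aoff : Nat) (ue : State) (ret : Word) (s : Nat)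
    (v : State)
    (hv : AtPair Vorbis.L.imdct_step3_inner_s_loop.cut1 u₀ others frames len i0 koff k0 aoff ue ret s v) :
    ReachVia Lay μ WayInv v (fun w => AtPair pair2 u₀ others frames len i0 koff k0 aoff ue ret s w) := by
  -- 1. the assertion's fields; the entry state's facts (`he_room`, `he_top`, `he_stack` … are about `ue`)
  obtain ⟨hrip, hloop, hlt⟩ := hv
  obtain ⟨hbody, hle, hcnt, hk0reg, hee0, hee2⟩ := hloop
  obtain ⟨he, hpre, hcodeok, habi, hframe, hsame, hshadow⟩ := hbody
  obtain ⟨hrsp, sret, s15, s14, s13, s12, sbp, sbx⟩ := hframe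
  have he0 := he
  have hpre0 := hpre
  v_entry he
  obtain ⟨hsh, hn31, hi0, hneg, haoff, haoff29, hk0slot, hk031, hstride, hlive, hA⟩ := hpre
  -- 2. the present state under the walker's names
  have hdf := habi.1
  have hmx := habi.2
  have hsse : SseOK v := sseOK_of_abiInv habi
  have w_eq : Mem.EqOn Vorbis.L.textLo Vorbis.L.textHi u₀.mem v.mem := hcodeok
  have w_rip := hrip
  have w_rsp := hrsp
  -- the footprint so far and the untouched shadow, in the forms `u_same` / `v_untouched` find
  have hshadow' := hshadow
  unfold Asan.ShadowUntouched at hshadow'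
  have hsame' := hsame
  simp only [X86.User.Spec.footprint, vspec] at hsame'
  -- 3. the arithmetic of the two groups of iteration `s`: inside the live buffer `e[0 .. len)`; the products are atoms
  have hg0 := hstride.ee0 hlt (Nat.le_refl 7)
  have hg2 := hstride.ee2 hlt (Nat.le_refl 7)
  have hhi := hstride.hi
  have hlo := hstride.lo
  rw [arg32_def] at hlo
  have hwhere := hlive.where_ hsh.inv hsh.offText (by omega) (by omega)
  have hksn : k0 * s ≤ k0 * ((ue.reg .rdi).toNat % 2 ^ 32 - 1) := by
    rw [arg32_def] at hlt
    exact Nat.mul_le_mul_left k0 (by omega)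
  have hee0' := hee0
  have hee2' := hee2
  obtain ⟨ks, hks⟩ : ∃ ks, k0 * s = ks := ⟨_, rfl⟩
  obtain ⟨kn, hkn⟩ : ∃ kn, k0 * ((ue.reg .rdi).toNat % 2 ^ 32 - 1) = kn := ⟨_, rfl⟩
  rw [hks] at hg0 hg2 hee0' hee2' hksn
  rw [hkn] at hksn hlo hsame'
  -- 4. the walk: four checks (C lines 2548-2553), stopping after each (at its `ret<k>` label)
  u_walk hcode [hμ.vendor] until [Vorbis.L.imdct_step3_inner_s_loop.ret9, pair2]
    span [Vorbis.L.textLo, Vorbis.L.textHi] side (v_side)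
  case check_106013 =>
    -- the load of ee0[-0]: inside the live buffer, and no store so far went to the shadow
    have hun : ShadowUntouched ue.mem s_106013.mem := by v_untouched
    exact hlive.accSmall hsh.inv hun _ 4 (by decide) (by u_omega) (by u_omega)
  -- (the check's `w_zmm : s.zmm = …` would switch the tracking of the vector registers on: the term doubles per SSE step)
  try clear w_zmm
  u_walk hcode [hμ.vendor] until [Vorbis.L.imdct_step3_inner_s_loop.ret10, pair2]
    span [Vorbis.L.textLo, Vorbis.L.textHi] side (v_side)
  case check_10601f =>
    -- the load of ee2[-0]: inside the live buffer, and no store so far went to the shadow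
    have hun : ShadowUntouched ue.mem s_10601f.mem := by v_untouched
    exact hlive.accSmall hsh.inv hun _ 4 (by decide) (by u_omega) (by u_omega)
  -- (the check's `w_zmm : s.zmm = …` would switch the tracking of the vector registers on: the term doubles per SSE step)
  try clear w_zmm
  u_walk hcode [hμ.vendor] until [Vorbis.L.imdct_step3_inner_s_loop.ret11, pair2]
    span [Vorbis.L.textLo, Vorbis.L.textHi] side (v_side)
  case check_106043 =>
    -- the load of ee0[-1]: inside the live buffer, and no store so far went to the shadow
    have hun : ShadowUntouched ue.mem s_106043.mem := by v_untouched
    exact hlive.accSmall hsh.inv hun _ 4 (by decide) (by u_omega) (by u_omega)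
  -- (the check's `w_zmm : s.zmm = …` would switch the tracking of the vector registers on: the term doubles per SSE step)
  try clear w_zmm
  u_walk hcode [hμ.vendor] until [Vorbis.L.imdct_step3_inner_s_loop.ret12, pair2]
    span [Vorbis.L.textLo, Vorbis.L.textHi] side (v_side)
  case check_106050 =>
    -- the load of ee2[-1]: inside the live buffer, and no store so far went to the shadow
    have hun : ShadowUntouched ue.mem s_106050.mem := by v_untouched
    exact hlive.accSmall hsh.inv hun _ 4 (by decide) (by u_omega) (by u_omega)
  -- (the check's `w_zmm : s.zmm = …` would switch the tracking of the vector registers on: the term doubles per SSE step)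
  try clear w_zmm
  u_walk hcode [hμ.vendor] until [pair2]
    span [Vorbis.L.textLo, Vorbis.L.textHi] side (v_side)
  -- 5. the exit assertion: the loop invariant again (nothing it speaks of moved), the frame and the footprint through the stores
  refine ReachVia.done ⟨w_rip, ⟨⟨he0, hpre0, w_eq, ?abi, ⟨w_rsp, ?_, ?_, ?_, ?_, ?_, ?_, ?_⟩, ?same, ?shadow⟩, hle, ?cnt, ?k0reg,
    ?ee0, ?ee2⟩, hlt⟩
  case abi => v_inv
  case same =>
    simp only [X86.User.Spec.footprint, vspec]
    rw [hkn]
    u_same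
  case shadow => v_untouched
  case cnt =>
    rw [w_kept .r13 rfl]
    exact hcnt
  case k0reg =>
    rw [w_kept .r15 rfl]
    exact hk0reg
  case ee0 =>
    rw [w_kept .rbp rfl]
    exact hee0
  case ee2 =>
    rw [w_kept .rbx rfl]
    exact hee2
  · u_frame sret
  · u_frame s15
  · u_frame s14
  · u_frame s13
  · u_frame s12
  · u_frame sbp
  · u_frame sbx

/-- **Float pair 2 of the body** (0x1060b6 … 0x106158, C lines 2555-2560: `ee0[-2]`, `ee0[-3]`, `ee2[-2]`, `ee2[-3]` read with four
`load4` checks, combined with two twiddle factors and stored back): from the assertion at its first instruction to the assertion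
at the first instruction of the next pair. -/
theorem pair2_ok (Lay : Layout) (hLay : Lay.hi = 0x1000000) (μ : Microarch) (hμ : UserX.MicroOK μ) (u₀ : State)
    (hcode : HasCodeNat Lay u₀ Vorbis.L.imdct_step3_inner_s_loop.entry Vorbis.Code.code_imdct_step3_inner_s_loop.nat
      Vorbis.L.imdct_step3_inner_s_loop.size)
    (hload4 : Asan.SmallCheck Lay μ Vorbis.WayInv (Vorbis.CodeOK u₀) [.rax, .rcx, .rdx] 4 Vorbis.L.__asan_load4_noabort.entry)
    (others : List Obj) (frames : List (Nat × FrameLayout)) (len i0 koff k0 aoff : Nat) (ue : State) (ret : Word) (s : Nat)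
    (v : State)
    (hv : AtPair pair2 u₀ others frames len i0 koff k0 aoff ue ret s v) :
    ReachVia Lay μ WayInv v (fun w => AtPair pair3 u₀ others frames len i0 koff k0 aoff ue ret s w) := by
  -- 1. the assertion's fields; the entry state's facts (`he_room`, `he_top`, `he_stack` … are about `ue`)
  obtain ⟨hrip, hloop, hlt⟩ := hv
  obtain ⟨hbody, hle, hcnt, hk0reg, hee0, hee2⟩ := hloop
  obtain ⟨he, hpre, hcodeok, habi, hframe, hsame, hshadow⟩ := hbody
  obtain ⟨hrsp, sret, s15, s14, s13, s12, sbp, sbx⟩ := hframe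
  have he0 := he
  have hpre0 := hpre
  v_entry he
  obtain ⟨hsh, hn31, hi0, hneg, haoff, haoff29, hk0slot, hk031, hstride, hlive, hA⟩ := hpre
  -- 2. the present state under the walker's names
  have hdf := habi.1
  have hmx := habi.2
  have hsse : SseOK v := sseOK_of_abiInv habi
  have w_eq : Mem.EqOn Vorbis.L.textLo Vorbis.L.textHi u₀.mem v.mem := hcodeok
  have w_rip := hrip
  have w_rsp := hrsp
  -- the footprint so far and the untouched shadow, in the forms `u_same` / `v_untouched` find
  have hshadow' := hshadow
  unfold Asan.ShadowUntouched at hshadow'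
  have hsame' := hsame
  simp only [X86.User.Spec.footprint, vspec] at hsame'
  -- 3. the arithmetic of the two groups of iteration `s`: inside the live buffer `e[0 .. len)`; the products are atoms
  have hg0 := hstride.ee0 hlt (Nat.le_refl 7)
  have hg2 := hstride.ee2 hlt (Nat.le_refl 7)
  have hhi := hstride.hi
  have hlo := hstride.lo
  rw [arg32_def] at hlo
  have hwhere := hlive.where_ hsh.inv hsh.offText (by omega) (by omega)
  have hksn : k0 * s ≤ k0 * ((ue.reg .rdi).toNat % 2 ^ 32 - 1) := by
    rw [arg32_def] at hlt
    exact Nat.mul_le_mul_left k0 (by omega)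
  have hee0' := hee0
  have hee2' := hee2
  obtain ⟨ks, hks⟩ : ∃ ks, k0 * s = ks := ⟨_, rfl⟩
  obtain ⟨kn, hkn⟩ : ∃ kn, k0 * ((ue.reg .rdi).toNat % 2 ^ 32 - 1) = kn := ⟨_, rfl⟩
  rw [hks] at hg0 hg2 hee0' hee2' hksn
  rw [hkn] at hksn hlo hsame'
  -- 4. the walk: four checks (C lines 2555-2560), stopping after each (at its `ret<k>` label)
  u_walk hcode [hμ.vendor] until [Vorbis.L.imdct_step3_inner_s_loop.ret13, pair3]
    span [Vorbis.L.textLo, Vorbis.L.textHi] side (v_side)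
  case check_1060ba =>
    -- the load of ee0[-2]: inside the live buffer, and no store so far went to the shadow
    have hun : ShadowUntouched ue.mem s_1060ba.mem := by v_untouched
    exact hlive.accSmall hsh.inv hun _ 4 (by decide) (by u_omega) (by u_omega)
  -- (the check's `w_zmm : s.zmm = …` would switch the tracking of the vector registers on: the term doubles per SSE step)
  try clear w_zmm
  u_walk hcode [hμ.vendor] until [Vorbis.L.imdct_step3_inner_s_loop.ret14, pair3]
    span [Vorbis.L.textLo, Vorbis.L.textHi] side (v_side)
  case check_1060c7 =>
    -- the load of ee2[-2]: inside the live buffer, and no store so far went to the shadow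
    have hun : ShadowUntouched ue.mem s_1060c7.mem := by v_untouched
    exact hlive.accSmall hsh.inv hun _ 4 (by decide) (by u_omega) (by u_omega)
  -- (the check's `w_zmm : s.zmm = …` would switch the tracking of the vector registers on: the term doubles per SSE step)
  try clear w_zmm
  u_walk hcode [hμ.vendor] until [Vorbis.L.imdct_step3_inner_s_loop.ret15, pair3]
    span [Vorbis.L.textLo, Vorbis.L.textHi] side (v_side)
  case check_1060e9 =>
    -- the load of ee0[-3]: inside the live buffer, and no store so far went to the shadow
    have hun : ShadowUntouched ue.mem s_1060e9.mem := by v_untouched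
    exact hlive.accSmall hsh.inv hun _ 4 (by decide) (by u_omega) (by u_omega)
  -- (the check's `w_zmm : s.zmm = …` would switch the tracking of the vector registers on: the term doubles per SSE step)
  try clear w_zmm
  u_walk hcode [hμ.vendor] until [Vorbis.L.imdct_step3_inner_s_loop.ret16, pair3]
    span [Vorbis.L.textLo, Vorbis.L.textHi] side (v_side)
  case check_1060f6 =>
    -- the load of ee2[-3]: inside the live buffer, and no store so far went to the shadow
    have hun : ShadowUntouched ue.mem s_1060f6.mem := by v_untouched
    exact hlive.accSmall hsh.inv hun _ 4 (by decide) (by u_omega) (by u_omega)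
  -- (the check's `w_zmm : s.zmm = …` would switch the tracking of the vector registers on: the term doubles per SSE step)
  try clear w_zmm
  u_walk hcode [hμ.vendor] until [pair3]
    span [Vorbis.L.textLo, Vorbis.L.textHi] side (v_side)
  -- 5. the exit assertion: the loop invariant again (nothing it speaks of moved), the frame and the footprint through the stores
  refine ReachVia.done ⟨w_rip, ⟨⟨he0, hpre0, w_eq, ?abi, ⟨w_rsp, ?_, ?_, ?_, ?_, ?_, ?_, ?_⟩, ?same, ?shadow⟩, hle, ?cnt, ?k0reg,
    ?ee0, ?ee2⟩, hlt⟩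
  case abi => v_inv
  case same =>
    simp only [X86.User.Spec.footprint, vspec]
    rw [hkn]
    u_same
  case shadow => v_untouched
  case cnt =>
    rw [w_kept .r13 rfl]
    exact hcnt
  case k0reg =>
    rw [w_kept .r15 rfl]
    exact hk0reg
  case ee0 =>
    rw [w_kept .rbp rfl]
    exact hee0
  case ee2 =>
    rw [w_kept .rbx rfl]
    exact hee2
  · u_frame sret
  · u_frame s15
  · u_frame s14
  · u_frame s13
  · u_frame s12
  · u_frame sbp
  · u_frame sbx

end Vorbis.Spec.imdct_step3_inner_s_loop_2
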